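-- pv_equiv track=rewrite | github.com/Eratousth/ChemChain | Chemregister.py | formulaProcessor
-- ===== SOURCE A (Python) =====
-- def formulaProcessor(old_formula):
--     new_formula = []
--     item_counter = 0
--     subset_counter = 0
--     letter_counter = 0
--     for subset in old_formula:
--         new_formula.append([""])
--         for letter in subset:
--             try:
--                 if subset[letter_counter+1].isupper():
--                     new_formula[subset_counter][item_counter] += letter
--                     new_formula[subset_counter].append("")
--                     item_counter += 1
--                 else:
--                     new_formula[subset_counter][item_counter] += letter
--             except:
--                 new_formula[subset_counter][item_counter] += letter
--             letter_counter += 1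
--         item_counter = 0
--         letter_counter = 0
--         subset_counter += 1
--     return new_formula
-- ===== SOURCE B (Python) =====
-- def formulaProcessor(old_formula):
--     new_formula = []
--     for subset in old_formula:
--         bounds = [0] + [i for i, ch in enumerate(subset) if i > 0 and ch.isupper()]
--         ends = bounds[1:] + [len(subset)]
--         new_formula.append([subset[a:b] for a, b in zip(bounds, ends)])
--     return new_formula
-- ===== Notes on version B (the rewrite author's own statement) =====
-- stated objective: alternative
-- what changed: Replaces A's single indexed scan with lookahead and try/except (appending each letter into the growing token and starting a new token when the next character is uppercase) by a two-pass build: first collect the uppercase boundary indices of each subset, then slice the subset between consecutive boundaries.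
import Mathlib
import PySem

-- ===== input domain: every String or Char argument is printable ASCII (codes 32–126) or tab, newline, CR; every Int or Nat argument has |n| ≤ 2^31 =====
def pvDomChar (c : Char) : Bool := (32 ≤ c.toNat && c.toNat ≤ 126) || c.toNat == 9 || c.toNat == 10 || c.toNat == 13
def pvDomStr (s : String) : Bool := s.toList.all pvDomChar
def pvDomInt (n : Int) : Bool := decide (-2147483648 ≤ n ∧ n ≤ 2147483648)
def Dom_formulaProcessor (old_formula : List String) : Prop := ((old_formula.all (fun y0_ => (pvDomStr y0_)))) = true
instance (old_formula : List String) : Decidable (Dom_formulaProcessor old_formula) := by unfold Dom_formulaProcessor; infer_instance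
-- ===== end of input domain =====

-- B replaces A's lookahead/try-except indexed scan by building the list of uppercase boundary
-- indices first and then slicing each subset between consecutive boundaries (objective: alternative).

-- ===== PORT A =====
-- new_formula[subset_counter][item_counter] += letter
def fpAppend (nf : List (List String)) (sc ic : Int) (letter : Char) : List (List String) :=
  PySem.List.pySetD nf sc
    (PySem.List.pySetD (PySem.List.pyGetD nf sc []) ic
      (PySem.List.pyGetD (PySem.List.pyGetD nf sc []) ic "" ++ letter.toString))

-- one iteration of A's inner 'for letter in subset' loop; the bare 'except' can only be the
-- IndexError of subset[letter_counter+1], i.e. the 'none' branch of pyGet?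
def fpInner (subset : String) (st : List (List String) × Int × Int × Int) (letter : Char) :
    List (List String) × Int × Int × Int :=
  match st with
  | (nf, ic, lc, sc) =>
    match PySem.Str.pyGet? subset (lc + 1) with
    | some nxt =>
      if PySem.Chars.isupper nxt then
        let nf1 := fpAppend nf sc ic letter
        (PySem.List.pySetD nf1 sc (PySem.List.pyGetD nf1 sc [] ++ [""]), ic + 1, lc + 1, sc)
      else
        (fpAppend nf sc ic letter, ic, lc + 1, sc)
    | none => (fpAppend nf sc ic letter, ic, lc + 1, sc)

-- one iteration of A's outer 'for subset in old_formula' loop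
def fpOuter (st : List (List String) × Int × Int × Int) (subset : String) :
    List (List String) × Int × Int × Int :=
  match st with
  | (nf, ic, lc, sc) =>
    match subset.toList.foldl (fpInner subset) (nf ++ [[""]], ic, lc, sc) with
    | (nf', _, _, sc') => (nf', 0, 0, sc' + 1)

def formulaProcessor (old_formula : List String) : List (List String) :=
  (old_formula.foldl fpOuter (([] : List (List String)), (0 : Int), (0 : Int), (0 : Int))).1

-- ===== PORT B =====
def formulaProcessor_alt (old_formula : List String) : List (List String) :=
  old_formula.map (fun subset =>
    let bounds : List Int :=
      0 :: ((PySem.List.enumerate subset.toList 0).filter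
              (fun p => decide (0 < p.1) && PySem.Chars.isupper p.2)).map (fun p => p.1)
    let ends : List Int := bounds.tail ++ [PySem.Str.len subset]
    (bounds.zip ends).map (fun ab => PySem.Str.slice subset (some ab.1) (some ab.2)))

-- ===== PRECONDITION & SPEC =====
def Spec_formulaProcessor (old_formula : List String) (out : List (List String)) : Prop := out = formulaProcessor_alt old_formula
instance (old_formula : List String) (out : List (List String)) : Decidable (Spec_formulaProcessor old_formula out) := by unfold Spec_formulaProcessor; infer_instance

-- ===== CLAIM (what is proved, stated in full; the proofs are below) =====
def Claim_equal_formulaProcessor : Prop := ∀ (old_formula : List String), Dom_formulaProcessor old_formula → Spec_formulaProcessor old_formula (formulaProcessor old_formula)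

-- ===== LEMMAS AND PROOFS =====

-- the common reference tokenizer: split a character list into element tokens, a new token
-- starting at every uppercase character after position 0
def nextUp : List Char → Bool
  | [] => false
  | d :: _ => PySem.Chars.isupper d

def glue (t : String) : List String → List String
  | [] => [t]
  | x :: xs => (t ++ x) :: xs

def tok : List Char → List String
  | [] => [""]
  | c :: cs => if nextUp cs then String.ofList [c] :: tok cs else glue (String.ofList [c]) (tok cs)

lemma glue_ne_nil (t : String) (l : List String) : glue t l ≠ [] := by
  cases l <;> simp [glue]

lemma tok_ne_nil (cs : List Char) : tok cs ≠ [] := by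
  cases cs with
  | nil => simp [tok]
  | cons c cs =>
    unfold tok
    split
    · simp
    · exact glue_ne_nil _ _

lemma glue_empty (l : List String) (h : l ≠ []) : glue "" l = l := by
  cases l with
  | nil => exact absurd rfl h
  | cons x xs => simp [glue]

lemma glue_glue (a b : String) (l : List String) : glue (a ++ b) l = glue a (glue b l) := by
  cases l <;> simp [glue, String.append_assoc]

lemma char_toString (c : Char) : c.toString = String.ofList [c] := by
  apply String.toList_inj.mp; simp

lemma fpAppend_eq (done : List (List String)) (ts : List String) (t : String) (c : Char) :
    fpAppend (done ++ [ts ++ [t]]) ((done.length : Int)) ((ts.length : Int)) c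
      = done ++ [ts ++ [t ++ c.toString]] := by
  unfold fpAppend
  simp

lemma push_ofList (t : String) (c : Char) : t.push c = t ++ String.ofList [c] := by
  apply String.toList_inj.mp; simp

lemma lookahead (u : List Char) (c : Char) (cs' : List Char) :
    PySem.List.pyGet? (u ++ c :: cs') ((u.length : Int) + 1) = cs'[0]? := by
  rw [show ((u.length : Int) + 1) = ((u.length + 1 : Nat) : Int) by push_cast; ring,
      PySem.List.pyGet?_natCast]
  simp [List.getElem?_append_right]

lemma innerA_spec : ∀ (cs u : List Char) (subset : String), subset.toList = u ++ cs →
    ∀ (done : List (List String)) (ts : List String) (t : String),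
    ∃ ic' lc',
      cs.foldl (fpInner subset)
          (done ++ [ts ++ [t]], (ts.length : Int), (u.length : Int), (done.length : Int))
        = (done ++ [ts ++ glue t (tok cs)], ic', lc', (done.length : Int)) := by
  intro cs
  induction cs with
  | nil =>
    intro u subset h done ts t
    exact ⟨(ts.length : Int), (u.length : Int), by simp [tok, glue]⟩
  | cons c cs' ih =>
    intro u subset h done ts t
    have hget : PySem.Str.pyGet? subset ((u.length : Int) + 1) = cs'[0]? := by
      rw [show PySem.Str.pyGet? subset ((u.length : Int) + 1)
            = PySem.List.pyGet? subset.toList ((u.length : Int) + 1) by simp, h]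
      exact lookahead u c cs'
    cases cs' with
    | nil =>
      refine ⟨(ts.length : Int), (u.length : Int) + 1, ?_⟩
      simp only [List.foldl_cons, List.foldl_nil, fpInner, hget]
      rw [fpAppend_eq]
      simp [tok, nextUp, glue, push_ofList]
    | cons d cs'' =>
      by_cases hd : PySem.Chars.isupper d = true
      · have step : fpInner subset
            (done ++ [ts ++ [t]], (ts.length : Int), (u.length : Int), (done.length : Int)) c
            = (done ++ [(ts ++ [t ++ c.toString]) ++ [""]],
               (ts.length : Int) + 1, (u.length : Int) + 1, (done.length : Int)) := by
          simp only [fpInner, hget]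
          simp only [List.getElem?_cons_zero, hd, if_true]
          rw [fpAppend_eq]
          simp
        have hcast1 : ((ts ++ [t ++ c.toString]).length : Int) = (ts.length : Int) + 1 := by
          simp
        have hcast2 : ((u ++ [c]).length : Int) = (u.length : Int) + 1 := by simp
        obtain ⟨ic', lc', hrec⟩ := ih (u ++ [c]) subset (by simp [h])
          done (ts ++ [t ++ c.toString]) ""
        refine ⟨ic', lc', ?_⟩
        rw [List.foldl_cons, step, ← hcast1, ← hcast2, hrec]
        have : tok (c :: d :: cs'') = String.ofList [c] :: tok (d :: cs'') := by
          simp [tok, nextUp, hd]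
        rw [this]
        have hne := tok_ne_nil (d :: cs'')
        cases htok : tok (d :: cs'') with
        | nil => exact absurd htok hne
        | cons x xs => simp [glue, push_ofList]
      · have step : fpInner subset
            (done ++ [ts ++ [t]], (ts.length : Int), (u.length : Int), (done.length : Int)) c
            = (done ++ [ts ++ [t ++ c.toString]],
               (ts.length : Int), (u.length : Int) + 1, (done.length : Int)) := by
          simp only [fpInner, hget, List.getElem?_cons_zero]
          rw [fpAppend_eq]
          simp [hd]
        have hcast2 : ((u ++ [c]).length : Int) = (u.length : Int) + 1 := by simp
        obtain ⟨ic', lc', hrec⟩ := ih (u ++ [c]) subset (by simp [h]) done ts (t ++ c.toString)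
        refine ⟨ic', lc', ?_⟩
        rw [List.foldl_cons, step, ← hcast2, hrec]
        have : tok (c :: d :: cs'') = glue (String.ofList [c]) (tok (d :: cs'')) := by
          simp [tok, nextUp, hd]
        rw [this, ← char_toString, ← glue_glue]

lemma outer_spec : ∀ (fs : List String) (done : List (List String)),
    (fs.foldl fpOuter (done, (0 : Int), (0 : Int), (done.length : Int))).1
      = done ++ fs.map (fun s => tok s.toList) := by
  intro fs
  induction fs with
  | nil => intro done; simp
  | cons s fs' ih =>
    intro done
    obtain ⟨ic', lc', hrec⟩ := innerA_spec s.toList [] s rfl done [] ""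
    have step : fpOuter (done, (0 : Int), (0 : Int), (done.length : Int)) s
        = (done ++ [tok s.toList], 0, 0, (done.length : Int) + 1) := by
      simp only [List.length_nil, Nat.cast_zero, List.nil_append] at hrec
      simp only [fpOuter]
      rw [hrec]
      simp [glue_empty _ (tok_ne_nil s.toList)]
    rw [List.foldl_cons, step,
        show (done.length : Int) + 1 = ((done ++ [tok s.toList]).length : Int) by simp,
        ih (done ++ [tok s.toList])]
    simp

lemma formulaProcessor_eq_map (old_formula : List String) :
    formulaProcessor old_formula = old_formula.map (fun s => tok s.toList) := by
  unfold formulaProcessor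
  have := outer_spec old_formula []
  simpa using this

-- ===== B side =====

-- the uppercase positions of a character list, numbered from q
def upsInt : Int → List Char → List Int
  | _, [] => []
  | q, c :: cs => if PySem.Chars.isupper c then q :: upsInt (q + 1) cs else upsInt (q + 1) cs

lemma enum_filter : ∀ (l : List Char) (a : Int), 1 ≤ a →
    ((PySem.List.enumerate l a).filter
        (fun p => decide (0 < p.1) && PySem.Chars.isupper p.2)).map (fun p => p.1)
      = upsInt a l := by
  intro l
  induction l with
  | nil => intro a _; simp [upsInt]
  | cons c cs ih =>
    intro a ha
    rw [PySem.List.enumerate_cons]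
    by_cases hc : PySem.Chars.isupper c = true
    · simp [upsInt, hc, show (0 : Int) < a by omega, ih (a + 1) (by omega)]
    · simp [upsInt, hc, ih (a + 1) (by omega)]

lemma bounds_eq (s : List Char) :
    ((PySem.List.enumerate s 0).filter
        (fun p => decide (0 < p.1) && PySem.Chars.isupper p.2)).map (fun p => p.1)
      = upsInt 1 s.tail := by
  cases s with
  | nil => simp [upsInt]
  | cons c cs =>
    rw [PySem.List.enumerate_cons]
    simp [enum_filter cs 1 le_rfl]

def segs (subset : String) (n : Int) : Int → List Int → List String
  | a, [] => [PySem.Str.slice subset (some a) (some n)]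
  | a, b :: bs => PySem.Str.slice subset (some a) (some b) :: segs subset n b bs

lemma zip_segs (subset : String) (n : Int) : ∀ (U : List Int) (a : Int),
    ((a :: U).zip (U ++ [n])).map
        (fun ab => PySem.Str.slice subset (some ab.1) (some ab.2))
      = segs subset n a U := by
  intro U
  induction U with
  | nil => intro a; simp [segs]
  | cons b bs ih => intro a; simp [segs, ih b]

lemma upsInt_ge : ∀ (l : List Char) (q b : Int), b ∈ upsInt q l → q ≤ b := by
  intro l
  induction l with
  | nil => intro q b h; simp [upsInt] at h
  | cons c cs ih =>
    intro q b h
    unfold upsInt at h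
    by_cases hc : PySem.Chars.isupper c = true
    · rw [if_pos hc] at h
      rcases List.mem_cons.mp h with h | h
      · omega
      · have := ih (q + 1) b h; omega
    · rw [if_neg hc] at h
      have := ih (q + 1) b h; omega

lemma slice_cons_split (subset : String) (u : List Char) (c : Char) (rest : List Char)
    (h : subset.toList = u ++ c :: rest) (b : Int) (hb : (u.length : Int) + 1 ≤ b) :
    PySem.Str.slice subset (some ((u.length : Int))) (some b)
      = String.ofList [c] ++ PySem.Str.slice subset (some ((u.length : Int) + 1)) (some b) := by
  apply String.toList_inj.mp
  simp only [String.toList_append, String.toList_ofList, PySem.Str.toList_slice,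
    PySem.Chars.slice_eq_listSlice]
  rw [PySem.List.slice_toNat _ (by positivity) (by omega),
      PySem.List.slice_toNat _ (by positivity) (by omega), h]
  have h1 : ((u.length : Int)).toNat = u.length := by omega
  have h2 : ((u.length : Int) + 1).toNat = u.length + 1 := by omega
  rw [h1, h2]
  have d1 : List.drop u.length (u ++ c :: rest) = c :: rest := List.drop_left' rfl
  have d2 : List.drop (u.length + 1) (u ++ c :: rest) = rest := by
    rw [show u ++ c :: rest = (u ++ [c]) ++ rest by simp]
    exact List.drop_left' (by simp)
  have h3 : b.toNat - u.length = (b.toNat - (u.length + 1)) + 1 := by omega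
  rw [d1, d2, h3, List.take_succ_cons]
  simp

lemma slice_empty (subset : String) (a : Int) (ha : 0 ≤ a) :
    PySem.Str.slice subset (some a) (some a) = "" := by
  apply String.toList_inj.mp
  simp only [PySem.Str.toList_slice, PySem.Chars.slice_eq_listSlice]
  rw [PySem.List.slice_toNat _ ha ha]
  simp

lemma segs_shift (subset : String) (u : List Char) (c : Char) (rest : List Char)
    (h : subset.toList = u ++ c :: rest) (U : List Int)
    (hU : ∀ b ∈ U, (u.length : Int) + 1 ≤ b) :
    segs subset ((subset.length : Int)) ((u.length : Int)) U
      = glue (String.ofList [c])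
          (segs subset ((subset.length : Int)) ((u.length : Int) + 1) U) := by
  have hlen : subset.length = u.length + rest.length + 1 := by
    have := congrArg List.length h
    simp at this
    omega
  cases U with
  | nil =>
    have hn : (u.length : Int) + 1 ≤ (subset.length : Int) := by omega
    simp only [segs, glue]
    rw [slice_cons_split subset u c rest h _ hn]
  | cons b bs =>
    have hb := hU b (List.mem_cons_self ..)
    simp only [segs, glue]
    rw [slice_cons_split subset u c rest h b hb]

lemma segs_tok : ∀ (cs u : List Char) (subset : String), subset.toList = u ++ cs →
    segs subset ((subset.length : Int)) ((u.length : Int))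
        (upsInt ((u.length : Int) + 1) cs.tail)
      = tok cs := by
  intro cs
  induction cs with
  | nil =>
    intro u subset h
    have hl : (subset.length : Int) = (u.length : Int) := by
      have := congrArg List.length h
      simp at this
      omega
    simp only [upsInt, segs, tok, hl, List.tail_nil]
    rw [slice_empty subset _ (by positivity)]
  | cons c cs' ih =>
    intro u subset h
    cases cs' with
    | nil =>
      have hlen : (subset.length : Int) = (u.length : Int) + 1 := by
        have := congrArg List.length h
        simp at this
        omega
      have hslice := slice_cons_split subset u c [] h ((u.length : Int) + 1) le_rfl
      simp only [List.tail_cons, upsInt, segs, hlen]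
      rw [hslice, slice_empty subset _ (by positivity)]
      simp [tok, nextUp, glue]
    | cons d cs'' =>
      have hcast : ((u ++ [c]).length : Int) = (u.length : Int) + 1 := by simp
      have hrec := ih (u ++ [c]) subset (by simp [h])
      rw [hcast] at hrec
      simp only [List.tail_cons] at hrec ⊢
      by_cases hd : PySem.Chars.isupper d = true
      · have hU : upsInt ((u.length : Int) + 1) (d :: cs'')
            = ((u.length : Int) + 1) :: upsInt ((u.length : Int) + 2) cs'' := by
          simp [upsInt, hd]; ring_nf
        rw [hU]
        simp only [segs]
        have hslice := slice_cons_split subset u c (d :: cs'') h ((u.length : Int) + 1) le_rfl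
        rw [hslice, slice_empty subset _ (by positivity)]
        have : ((u.length : Int) + 1) + 1 = (u.length : Int) + 2 := by ring
        rw [this] at hrec
        rw [hrec]
        simp [tok, nextUp, hd]
      · have hU : upsInt ((u.length : Int) + 1) (d :: cs'')
            = upsInt ((u.length : Int) + 2) cs'' := by
          simp [upsInt, hd]; ring_nf
        rw [hU]
        have hbnd : ∀ b ∈ upsInt ((u.length : Int) + 2) cs'', (u.length : Int) + 1 ≤ b := by
          intro b hb
          have := upsInt_ge cs'' _ b hb; omega
        rw [segs_shift subset u c (d :: cs'') h _ hbnd]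
        have : ((u.length : Int) + 1) + 1 = (u.length : Int) + 2 := by ring
        rw [this] at hrec
        rw [hrec]
        simp [tok, nextUp, hd]

lemma alt_eq_map (old_formula : List String) :
    formulaProcessor_alt old_formula = old_formula.map (fun s => tok s.toList) := by
  unfold formulaProcessor_alt
  apply List.map_congr_left
  intro s _
  simp only [List.tail_cons]
  rw [bounds_eq s.toList, zip_segs]
  have hlen : PySem.Str.len s = (s.toList.length : Int) := by simp [PySem.Str.len_eq]
  have h0 : (0 : Int) = (([] : List Char).length : Int) := by simp
  rw [hlen, h0, show (1 : Int) = (([] : List Char).length : Int) + 1 by simp,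
      show s.toList.tail = (s.toList).tail from rfl]
  exact segs_tok s.toList [] s rfl

-- ===== VERDICT (by name: the statement is the Claim_ definition above) =====
theorem formulaProcessor_spec : Claim_equal_formulaProcessor := by
  intro old_formula _
  show formulaProcessor old_formula = formulaProcessor_alt old_formula
  rw [formulaProcessor_eq_map, alt_eq_map]
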